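-- pv_equiv track=rewrite | github.com/rayanht/UK-Biobank-Visualisation | src/dataset.py | word_prefix
-- ===== SOURCE A (Python) =====
-- from typing import Generator, List, Tuple
--
-- def word_prefix(row: List[str], prefix_words: List[str]) -> bool:
--     """Check if string starts with prefix at any point"""
--     for i, word in enumerate(row):
--         if word.startswith(prefix_words[0]):
--             index = 1
--             for w in row[i + index:]:
--                 if index == len(prefix_words):
--                     return True
--                 if not w.startswith(prefix_words[index]):
--                     break
--                 index += 1
--             if index == len(prefix_words):
--                 return True
--     return False
-- ===== SOURCE B (Python) =====
-- def word_prefix(row, prefix_words):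
--     """Check if string starts with prefix at any point"""
--     m = len(prefix_words)
--     active = []  # NFA-style state set: k = number of prefix words already matched ending here
--     for word in row:
--         nxt = []
--         for k in active:
--             if word.startswith(prefix_words[k]):
--                 if k + 1 == m:
--                     return True
--                 nxt.append(k + 1)
--         if word.startswith(prefix_words[0]):
--             if m == 1:
--                 return True
--             nxt.append(1)
--         active = nxt
--     return False
-- ===== Notes on version B (the rewrite author's own statement) =====
-- stated objective: alternative
-- what changed: Replaces A's restartable window scan (outer enumerate plus an inner loop over the slice row[i+1:] with a mutable match counter) by a single forward pass that carries an NFA-style set of active partial-match lengths, extending or dropping each state at every word and returning True as soon as a state reaches len(prefix_words).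
import Mathlib
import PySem

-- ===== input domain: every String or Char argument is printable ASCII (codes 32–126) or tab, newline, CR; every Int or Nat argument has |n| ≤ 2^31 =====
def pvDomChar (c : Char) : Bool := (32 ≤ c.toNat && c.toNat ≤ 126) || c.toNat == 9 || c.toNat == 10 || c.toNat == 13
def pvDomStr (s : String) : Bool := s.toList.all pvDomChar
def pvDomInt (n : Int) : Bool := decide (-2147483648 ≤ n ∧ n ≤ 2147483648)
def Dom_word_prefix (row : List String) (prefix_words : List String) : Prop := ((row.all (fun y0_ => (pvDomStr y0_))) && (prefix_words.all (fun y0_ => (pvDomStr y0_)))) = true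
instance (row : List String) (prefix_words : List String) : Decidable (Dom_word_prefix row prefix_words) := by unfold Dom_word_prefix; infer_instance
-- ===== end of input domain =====

-- B replaces A's restartable window scan (outer enumerate, inner loop over the slice row[i+1:])
-- by one forward pass that carries an NFA-style set of active partial-match lengths (objective: alternative).

-- ===== PORT A =====
-- inner loop: 'for w in row[i+1:]: …' with the mutable counter 'index'
def wpInner (ws : List String) (pw : List String) (index : Nat) : Bool :=
  match ws with
  | [] => index == pw.length
  | w :: rest =>
    if index == pw.length then true
    else if ¬ PySem.Str.startswith w (PySem.List.pyGetD pw (index : Int) "") then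
      index == pw.length      -- 'break' then the post-loop check (false here since index < len)
    else wpInner rest pw (index + 1)

-- outer loop: 'for i, word in enumerate(row)'; row[i+1:] is exactly the rest of the list
def wpOuter (ws : List String) (pw : List String) : Bool :=
  match ws with
  | [] => false
  | w :: rest =>
    if PySem.Str.startswith w (PySem.List.pyGetD pw 0 "") then
      if wpInner rest pw 1 then true else wpOuter rest pw
    else wpOuter rest pw

def word_prefix (row : List String) (prefix_words : List String) : Bool :=
  wpOuter row prefix_words

-- ===== PORT B =====
-- inner loop 'for k in active: …' building nxt; 'none' models the early 'return True'
def wpAltStep (pw : List String) (word : String) : List Nat → Option (List Nat)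
  | [] => some []
  | k :: ks =>
    if PySem.Str.startswith word (PySem.List.pyGetD pw (k : Int) "") then
      if k + 1 == pw.length then none
      else (wpAltStep pw word ks).map (fun nxt => (k + 1) :: nxt)
    else wpAltStep pw word ks

-- outer loop 'for word in row:' carrying the active state set
def wpAltOuter (pw : List String) : List String → List Nat → Bool
  | [], _ => false
  | w :: rest, active =>
    match wpAltStep pw w active with
    | none => true
    | some nxt =>
      if PySem.Str.startswith w (PySem.List.pyGetD pw 0 "") then
        if pw.length == 1 then true
        else wpAltOuter pw rest (nxt ++ [1])
      else wpAltOuter pw rest nxt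

def word_prefix_alt (row : List String) (prefix_words : List String) : Bool :=
  wpAltOuter prefix_words row []

-- ===== PRECONDITION & SPEC =====
-- Pre_ excludes exactly the inputs on which A raises: empty prefix_words with a nonempty row
-- (A's 'prefix_words[0]' raises IndexError there; B raises identically).
def Pre_word_prefix (row : List String) (prefix_words : List String) : Prop :=
  prefix_words ≠ [] ∨ row = []
instance (row : List String) (prefix_words : List String) : Decidable (Pre_word_prefix row prefix_words) := by unfold Pre_word_prefix; infer_instance

def pvWitness_word_prefix : List String × List String := (["ab", "c"], ["a"])

def Spec_word_prefix (row : List String) (prefix_words : List String) (out : Bool) : Prop := out = word_prefix_alt row prefix_words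
instance (row : List String) (prefix_words : List String) (out : Bool) : Decidable (Spec_word_prefix row prefix_words out) := by unfold Spec_word_prefix; infer_instance

-- ===== CLAIM (what is proved, stated in full; the proofs are below) =====
def Claim_equal_word_prefix : Prop := ∀ (row : List String) (prefix_words : List String), Dom_word_prefix row prefix_words → Pre_word_prefix row prefix_words → Spec_word_prefix row prefix_words (word_prefix row prefix_words)

-- ===== LEMMAS AND PROOFS =====

-- the common characterisation: pw matches the front of ws word by word
def matchFront : List String → List String → Bool
  | _, [] => true
  | [], _ :: _ => false
  | w :: ws, p :: ps => PySem.Str.startswith w p && matchFront ws ps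

-- pw matches at the front of some tail of ws
def anyTail : List String → List String → Bool
  | [], _ => false
  | w :: ws, pw => matchFront (w :: ws) pw || anyTail ws pw

theorem wpInner_eq (ws : List String) (pw : List String) (index : Nat)
    (h : index ≤ pw.length) : wpInner ws pw index = matchFront ws (pw.drop index) := by
  induction ws generalizing index with
  | nil =>
    by_cases he : index = pw.length
    · simp [wpInner, he, matchFront, List.drop_length]
    · have : index < pw.length := lt_of_le_of_ne h he
      have hd : pw.drop index ≠ [] := by
        simp [List.drop_eq_nil_iff]; omega
      cases hdd : pw.drop index with
      | nil => exact absurd hdd hd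
      | cons p ps => simp [wpInner, he, matchFront]
  | cons w rest ih =>
    by_cases he : index = pw.length
    · simp [wpInner, he, List.drop_length, matchFront]
    · have hlt : index < pw.length := lt_of_le_of_ne h he
      have hdrop : pw.drop index = pw[index] :: pw.drop (index + 1) :=
        List.drop_eq_getElem_cons hlt
      have hget : PySem.List.pyGetD pw (index : Int) "" = pw[index] := by
        rw [PySem.List.pyGetD_natCast]
        exact List.getD_eq_getElem _ _ hlt
      rw [wpInner, hdrop]
      simp only [matchFront, hget, PySem.Str.startswith_eq]
      cases hb : PySem.Chars.startswith w.toList pw[index].toList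
      · simp [he, hb]
      · simp [he, hb, ih (index + 1) hlt]

theorem wpOuter_eq (ws : List String) (pw : List String) (hpw : pw ≠ []) :
    wpOuter ws pw = anyTail ws pw := by
  cases pw with
  | nil => exact absurd rfl hpw
  | cons p ps =>
    induction ws with
    | nil => rfl
    | cons w rest ih =>
      have h1 : wpInner rest (p :: ps) 1 = matchFront rest ps := by
        rw [wpInner_eq rest (p :: ps) 1 (by simp)]; rfl
      have hget : PySem.List.pyGetD (p :: ps) (0 : Int) "" = p := by
        simp [PySem.List.pyGetD_zero_cons]
      rw [wpOuter]
      simp only [anyTail, matchFront, hget, h1, PySem.Str.startswith_eq]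
      cases hb : PySem.Chars.startswith w.toList p.toList
      · simp [hb, ih]
      · cases hm : matchFront rest ps
        · simp [hb, hm, ih]
        · simp [hb, hm]

-- B-side: the early-return case of the inner loop witnesses a full match at some active state
theorem wpAltStep_none (pw : List String) (w : String) (ws : List String) (active : List Nat) :
    (∀ k ∈ active, k < pw.length) → wpAltStep pw w active = none →
    (active.any fun k => matchFront (w :: ws) (pw.drop k)) = true := by
  induction active with
  | nil => intro _ hn; simp [wpAltStep] at hn
  | cons k ks ih =>
    intro hb hn
    have hk : k < pw.length := hb k List.mem_cons_self
    have hdrop : pw.drop k = pw[k] :: pw.drop (k + 1) := List.drop_eq_getElem_cons hk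
    have hget : PySem.List.pyGetD pw (k : Int) "" = pw[k] := by
      rw [PySem.List.pyGetD_natCast]; exact List.getD_eq_getElem _ _ hk
    rw [wpAltStep, hget] at hn
    simp only [List.any_cons]
    by_cases hs : PySem.Str.startswith w pw[k] = true
    · rw [if_pos hs] at hn
      by_cases hfull : k + 1 = pw.length
      · have hm : matchFront (w :: ws) (pw.drop k) = true := by
          rw [hdrop, hfull, List.drop_length]
          simp only [matchFront, hs, Bool.true_and]
        rw [hm]; simp
      · rw [if_neg (by simp [hfull])] at hn
        cases hrec : wpAltStep pw w ks with
        | none =>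
          rw [ih (fun j hj => hb j (List.mem_cons_of_mem _ hj)) hrec]
          simp
        | some nxt => rw [hrec] at hn; simp at hn
    · rw [if_neg hs] at hn
      rw [ih (fun j hj => hb j (List.mem_cons_of_mem _ hj)) hn]
      simp

-- B-side: the surviving states of the inner loop carry exactly the matches that extend through w
theorem wpAltStep_some (pw : List String) (w : String) (active : List Nat) :
    ∀ nxt, (∀ k ∈ active, k < pw.length) → wpAltStep pw w active = some nxt →
    (∀ k' ∈ nxt, k' < pw.length) ∧
    ∀ ws, (nxt.any fun k' => matchFront ws (pw.drop k')) =
      (active.any fun k => matchFront (w :: ws) (pw.drop k)) := by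
  induction active with
  | nil =>
    intro nxt _ hn
    simp only [wpAltStep, Option.some.injEq] at hn
    subst hn
    exact ⟨by simp, by simp⟩
  | cons k ks ih =>
    intro nxt hb hn
    have hk : k < pw.length := hb k List.mem_cons_self
    have hdrop : pw.drop k = pw[k] :: pw.drop (k + 1) := List.drop_eq_getElem_cons hk
    have hget : PySem.List.pyGetD pw (k : Int) "" = pw[k] := by
      rw [PySem.List.pyGetD_natCast]; exact List.getD_eq_getElem _ _ hk
    rw [wpAltStep, hget] at hn
    by_cases hs : PySem.Str.startswith w pw[k] = true
    · rw [if_pos hs] at hn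
      by_cases hfull : k + 1 = pw.length
      · rw [if_pos (by simp [hfull])] at hn; cases hn
      · rw [if_neg (by simp [hfull])] at hn
        cases hrec : wpAltStep pw w ks with
        | none => rw [hrec] at hn; simp at hn
        | some nxt' =>
          rw [hrec] at hn
          simp only [Option.map_some, Option.some.injEq] at hn
          subst hn
          obtain ⟨hb', heq⟩ := ih nxt' (fun j hj => hb j (List.mem_cons_of_mem _ hj)) hrec
          refine ⟨?_, fun ws => ?_⟩
          · intro k' hk'
            rcases List.mem_cons.mp hk' with h | h
            · subst h; omega
            · exact hb' _ h
          · have hterm : matchFront (w :: ws) (pw.drop k) = matchFront ws (pw.drop (k + 1)) := by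
              rw [hdrop]; simp only [matchFront, hs, Bool.true_and]
            simp only [List.any_cons, heq ws, hterm]
    · rw [if_neg hs] at hn
      obtain ⟨hb', heq⟩ := ih nxt (fun j hj => hb j (List.mem_cons_of_mem _ hj)) hn
      refine ⟨hb', fun ws => ?_⟩
      rw [heq ws]
      have hterm : matchFront (w :: ws) (pw.drop k) = false := by
        rw [hdrop]
        simp only [Bool.not_eq_true] at hs
        simp only [matchFront, hs, Bool.false_and]
      simp only [List.any_cons, hterm, Bool.false_or]

theorem wpAltOuter_eq (p : String) (ps : List String) (rest : List String) :
    ∀ (active : List Nat), (∀ k ∈ active, k < (p :: ps).length) →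
    wpAltOuter (p :: ps) rest active =
      ((active.any fun k => matchFront rest (List.drop k (p :: ps))) || anyTail rest (p :: ps)) := by
  induction rest with
  | nil =>
    intro active hb
    rw [wpAltOuter]
    have hz : (active.any fun k => matchFront [] (List.drop k (p :: ps))) = false := by
      simp only [List.any_eq_false]
      intro k hk
      have hkl : k < (p :: ps).length := hb k hk
      rw [List.drop_eq_getElem_cons hkl]
      simp [matchFront]
    simp [hz, anyTail]
  | cons w ws ih =>
    intro active hb
    rw [wpAltOuter]
    cases hstep : wpAltStep (p :: ps) w active with
    | none =>
      rw [wpAltStep_none (p :: ps) w ws active hb hstep]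
      simp
    | some nxt =>
      obtain ⟨hb', heq⟩ := wpAltStep_some (p :: ps) w active nxt hb hstep
      simp only []
      have hget0 : PySem.List.pyGetD (p :: ps) (0 : Int) "" = p := by
        simp [PySem.List.pyGetD_zero_cons]
      rw [hget0]
      by_cases hs : PySem.Str.startswith w p = true
      · rw [if_pos hs]
        by_cases h1 : ps = []
        · subst h1
          rw [if_pos (by simp)]
          have hm : matchFront (w :: ws) [p] = true := by
            simp only [matchFront, hs, Bool.true_and]
          simp [anyTail, hm]
        · have hl : ps.length ≠ 0 := fun h => h1 (List.eq_nil_of_length_eq_zero h)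
          rw [if_neg (by simp only [List.length_cons, beq_iff_eq]; omega)]
          rw [ih (nxt ++ [1]) (by
            intro k hk
            rcases List.mem_append.mp hk with h | h
            · exact hb' _ h
            · simp at h; subst h; simp only [List.length_cons]; omega)]
          rw [List.any_append, heq ws]
          have hf1 : ([1].any fun k' => matchFront ws (List.drop k' (p :: ps))) = matchFront ws ps := by
            simp [matchFront]
          have hm : matchFront (w :: ws) (p :: ps) = matchFront ws ps := by
            simp only [matchFront, hs, Bool.true_and]
          rw [hf1]
          simp only [anyTail, hm]
          rw [Bool.or_assoc]
      · rw [if_neg hs]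
        rw [ih nxt hb', heq ws]
        simp only [Bool.not_eq_true] at hs
        simp only [anyTail, matchFront, hs, Bool.false_and, Bool.false_or]

-- ===== VERDICT (by name: the statement is the Claim_ definition above) =====
theorem word_prefix_spec : Claim_equal_word_prefix := by
  intro row pw _ hpre
  unfold Spec_word_prefix word_prefix word_prefix_alt
  rcases hpre with hpw | hrow
  · cases pw with
    | nil => exact absurd rfl hpw
    | cons p ps =>
      rw [wpOuter_eq row (p :: ps) hpw, wpAltOuter_eq p ps row [] (by simp)]
      simp
  · subst hrow; cases pw <;> rfl
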